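-- pv_equiv track=rewrite | github.com/Woobs8/advent_of_code | 2019/24/part1.py | advance_time
-- ===== SOURCE A (Python) =====
-- from copy import deepcopy
--
-- BUG = '#'
--
-- EMPTY = '.'
--
-- def advance_time(state:list) -> list:
--     next_state = deepcopy(state)
--     for y, row in enumerate(state):
--         for x, col in enumerate(row):
--             adj_bugs = adjacent_bugs(state, x, y)
--             if col == BUG and adj_bugs != 1:
--                 next_state[y][x] = EMPTY
--             elif col == EMPTY and (adj_bugs == 1 or adj_bugs == 2):
--                 next_state[y][x] = BUG
--     return next_state
--
-- def adjacent_bugs(state:list, x:int, y:int) -> int: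
--     bugs = 0
--     if x-1 >= 0:
--         bugs += 1 if state[y][x-1] == BUG else 0
--
--     if x+1 < len(state[0]):
--         bugs += 1 if state[y][x+1] == BUG else 0
--
--     if y-1 >= 0:
--         bugs += 1 if state[y-1][x] == BUG else 0
--
--     if y+1 < len(state):
--         bugs += 1 if state[y+1][x] == BUG else 0
--     return bugs
-- ===== SOURCE B (Python) =====
-- BUG = '#'
--
-- EMPTY = '.'
--
-- def advance_time(state: list) -> list:
--     # whole-grid decomposition: neighbor counts as the elementwise sum of four
--     # shifted 0/1 indicator grids, then one map applying the rules; no per-cell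
--     # neighbor indexing and no mutation of the input.
--     ind = [[1 if c == BUG else 0 for c in row] for row in state]
--     zeros = [0] * (len(state[0]) if state else 0)
--     from_right = [r[1:] + [0] for r in ind]
--     from_left = [[0] + r[:-1] for r in ind]
--     from_below = ind[1:] + [zeros] if ind else []
--     from_above = [zeros] + ind[:-1] if ind else []
--     counts = [[a + b + c + d for a, b, c, d in zip(*rows)]
--               for rows in zip(from_right, from_left, from_below, from_above)]
--     return [[EMPTY if c == BUG and n != 1 else
--              BUG if c == EMPTY and (n == 1 or n == 2) else c
--              for c, n in zip(row, cnt_row)]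
--             for row, cnt_row in zip(state, counts)]
-- ===== Notes on version B (the rewrite author's own statement) =====
-- stated objective: alternative
-- what changed: Replaces the deepcopy-then-mutate double loop with per-cell neighbor gathering by a whole-grid decomposition: neighbor counts are the elementwise sum of four shifted 0/1 indicator grids, then one comprehension applies the automaton rules; no indexing helper and no mutation.
-- outside the precondition, e.g. on advance_time([['#', '.'], ['#']]): A raises IndexError, B returns [['#'], ['#']]
import Mathlib
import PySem

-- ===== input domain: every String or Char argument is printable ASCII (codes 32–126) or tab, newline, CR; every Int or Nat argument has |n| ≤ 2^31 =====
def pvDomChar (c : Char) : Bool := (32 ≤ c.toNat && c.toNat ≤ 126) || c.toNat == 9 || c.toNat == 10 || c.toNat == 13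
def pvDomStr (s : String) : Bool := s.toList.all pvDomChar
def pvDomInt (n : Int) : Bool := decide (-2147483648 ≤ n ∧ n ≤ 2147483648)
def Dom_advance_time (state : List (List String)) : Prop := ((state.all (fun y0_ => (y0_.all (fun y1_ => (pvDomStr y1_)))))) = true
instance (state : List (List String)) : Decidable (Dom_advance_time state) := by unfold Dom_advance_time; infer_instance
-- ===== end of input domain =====

-- B replaces the per-cell neighbor gather by whole-grid shifted indicator sums (same cost, different decomposition); A's deepcopy-then-mutate has no caller-visible effect on the argument, and Lean lists are immutable, so return-value equality is the whole story.


-- ===== PORT A =====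
-- helper of A; indices read with pyGetD: exact wherever Python's state[..][..] is in
-- range (everywhere under Pre_, which restricts to rectangular grids)
def adjacent_bugs (state : List (List String)) (x y : Int) : Int :=
  let bugs : Int := 0
  let bugs := if x - 1 ≥ 0 then
      bugs + (if PySem.List.pyGetD (PySem.List.pyGetD state y []) (x - 1) "" == "#" then 1 else 0)
    else bugs
  let bugs := if x + 1 < PySem.List.len (PySem.List.pyGetD state 0 []) then
      bugs + (if PySem.List.pyGetD (PySem.List.pyGetD state y []) (x + 1) "" == "#" then 1 else 0)
    else bugs
  let bugs := if y - 1 ≥ 0 then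
      bugs + (if PySem.List.pyGetD (PySem.List.pyGetD state (y - 1) []) x "" == "#" then 1 else 0)
    else bugs
  let bugs := if y + 1 < PySem.List.len state then
      bugs + (if PySem.List.pyGetD (PySem.List.pyGetD state (y + 1) []) x "" == "#" then 1 else 0)
    else bugs
  bugs

-- body of the inner loop: next_state[y][x] = … on the two write branches
def advanceStepA (state : List (List String)) (y : Int)
    (ns : List (List String)) (xcol : Int × String) : List (List String) :=
  let x := xcol.1
  let col := xcol.2
  let adj_bugs := adjacent_bugs state x y
  if col == "#" && adj_bugs != 1 then
    PySem.List.pySetD ns y (PySem.List.pySetD (PySem.List.pyGetD ns y []) x ".")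
  else if col == "." && (adj_bugs == 1 || adj_bugs == 2) then
    PySem.List.pySetD ns y (PySem.List.pySetD (PySem.List.pyGetD ns y []) x "#")
  else ns

def advance_time (state : List (List String)) : List (List String) :=
  let next_state := state  -- deepcopy: Lean lists are immutable, a structural copy is the list itself
  (PySem.List.enumerate state 0).foldl (fun ns yrow =>
    (PySem.List.enumerate yrow.2 0).foldl (advanceStepA state yrow.1) ns) next_state

-- ===== PORT B =====
-- python zip of four lists is ported as nested binary zips (same truncation to the shortest)
def advance_time_alt (state : List (List String)) : List (List String) :=
  let ind := state.map (fun row => row.map (fun c => if c == "#" then (1 : Int) else 0))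
  let zeros := List.replicate (if state = [] then 0 else (state.headD []).length) (0 : Int)
  let from_right := ind.map (fun r => PySem.List.slice r (some 1) none ++ [0])
  let from_left := ind.map (fun r => (0 : Int) :: PySem.List.slice r none (some (-1)))
  let from_below := if ind = [] then [] else PySem.List.slice ind (some 1) none ++ [zeros]
  let from_above := if ind = [] then [] else zeros :: PySem.List.slice ind none (some (-1))
  let counts := ((from_right.zip from_left).zip (from_below.zip from_above)).map
    (fun rows => ((rows.1.1.zip rows.1.2).zip (rows.2.1.zip rows.2.2)).map
      (fun q => q.1.1 + q.1.2 + q.2.1 + q.2.2))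
  (state.zip counts).map (fun p => (p.1.zip p.2).map (fun q =>
    if q.1 == "#" && q.2 != 1 then "."
    else if q.1 == "." && (q.2 == 1 || q.2 == 2) then "#"
    else q.1))

-- ===== PRECONDITION & SPEC =====
-- Pre_ excludes only non-rectangular grids: on every ragged grid with a cell, A's
-- adjacent_bugs reads past the end of a neighbouring row (or past len(state[0])) and
-- Python raises IndexError, so A returns on no excluded input.
def Pre_advance_time (state : List (List String)) : Prop :=
  ∀ row ∈ state, row.length = (state.headD []).length
instance (state : List (List String)) : Decidable (Pre_advance_time state) := by
  unfold Pre_advance_time; infer_instance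

def pvWitness_advance_time : List (List String) := [[".", "#"], ["#", "#"]]

def Spec_advance_time (state : List (List String)) (out : List (List String)) : Prop := out = advance_time_alt state
instance (state : List (List String)) (out : List (List String)) : Decidable (Spec_advance_time state out) := by unfold Spec_advance_time; infer_instance

-- ===== CLAIM (what is proved, stated in full; the proofs are below) =====
def Claim_equal_advance_time : Prop := ∀ (state : List (List String)), Dom_advance_time state → Pre_advance_time state → Spec_advance_time state (advance_time state)

-- ===== LEMMAS AND PROOFS =====

-- the per-cell rule, as a function of the cell and its gathered neighbour count
def cellSpec (state : List (List String)) (y x : Nat) (c : String) : String :=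
  let adj := adjacent_bugs state ↑x ↑y
  if c == "#" && adj != 1 then "."
  else if c == "." && (adj == 1 || adj == 2) then "#"
  else c

def rowSpec (state : List (List String)) (y : Nat) : Nat → List String → List String
  | _, [] => []
  | j, c :: tl => cellSpec state y j c :: rowSpec state y (j + 1) tl

def gridSpec (state : List (List String)) : Nat → List (List String) → List (List String)
  | _, [] => []
  | i, row :: tl => rowSpec state i 0 row :: gridSpec state (i + 1) tl

lemma take_succ_set {α : Type} (r : List α) (j : Nat) (v : α) (h : j < r.length) :
    (r.set j v).take (j + 1) = r.take j ++ [v] := by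
  rw [List.take_add_one]
  rw [List.take_set, List.set_eq_of_length_le (by simp)]
  simp [h]

lemma inner_eq (state : List (List String)) (y : Nat) :
    ∀ (suffix : List String) (j : Nat) (ns : List (List String)) (r : List String),
    ns.getD y [] = r →
    (∀ k (hk : k < suffix.length), r[j + k]? = some suffix[k]) →
    r.length = j + suffix.length →
    (PySem.List.enumerate suffix (j : Int)).foldl (advanceStepA state (y : Int)) ns
      = ns.set y (r.take j ++ rowSpec state y j suffix) := by
  intro suffix
  induction suffix with
  | nil =>
    intro j ns r h1 _ hlen
    simp only [PySem.List.enumerate_nil, List.foldl_nil, rowSpec, List.append_nil]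
    have hlen' : r.length = j := by simpa using hlen
    rw [List.take_of_length_le (by omega)]
    by_cases hy : y < ns.length
    · rw [← h1, List.getD_eq_getElem _ _ hy, List.set_getElem_self]
    · rw [List.set_eq_of_length_le (by omega)]
  | cons c tl ih =>
    intro j ns r h1 h2 hlen
    have hj : r[j]? = some c := by simpa using h2 0 (by simp)
    obtain ⟨hjlt, hrj⟩ := List.getElem?_eq_some_iff.mp hj
    have hylt : y < ns.length := by
      by_contra hy
      have hnil : ns.getD y [] = [] := by
        rw [List.getD_eq_getElem?_getD, List.getElem?_eq_none (by omega)]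
        rfl
      rw [h1] at hnil
      rw [hnil] at hjlt
      simp at hjlt
    have hstep : advanceStepA state (y : Int) ns ((j : Int), c)
        = ns.set y (r.set j (cellSpec state y j c)) := by
      unfold advanceStepA cellSpec
      simp only [PySem.List.pySetD_natCast, PySem.List.pyGetD_natCast, h1]
      split_ifs with hA hB
      · rfl
      · rfl
      · rw [← hrj, List.set_getElem_self, ← h1,
          List.getD_eq_getElem _ _ hylt, List.set_getElem_self]
    rw [PySem.List.enumerate_cons, List.foldl_cons, hstep]
    have hcast : (j : Int) + 1 = ((j + 1 : Nat) : Int) := by push_cast; ring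
    rw [hcast]
    rw [ih (j + 1) (ns.set y (r.set j (cellSpec state y j c))) (r.set j (cellSpec state y j c))
      (by
        rw [List.getD_eq_getElem _ _ (by simpa using hylt)]
        exact List.getElem_set_self (by simpa using hylt))
      (by
        intro k hk
        rw [List.getElem?_set_ne (by omega)]
        have := h2 (k + 1) (by simpa using hk)
        simpa [Nat.add_assoc, Nat.add_comm 1 k] using this)
      (by simp only [List.length_set, List.length_cons] at hlen ⊢; omega)]
    rw [List.set_set, take_succ_set r j _ hjlt]
    simp [rowSpec]

lemma outer_eq (state : List (List String)) :
    ∀ (suffix : List (List String)) (i : Nat) (ns : List (List String)),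
    (∀ k (hk : k < suffix.length), ns[i + k]? = some suffix[k]) →
    ns.length = i + suffix.length →
    (PySem.List.enumerate suffix (i : Int)).foldl (fun ns yrow =>
      (PySem.List.enumerate yrow.2 0).foldl (advanceStepA state yrow.1) ns) ns
      = ns.take i ++ gridSpec state i suffix := by
  intro suffix
  induction suffix with
  | nil =>
    intro i ns _ hlen
    simp only [PySem.List.enumerate_nil, List.foldl_nil, gridSpec, List.append_nil]
    have hlen' : ns.length = i := by simpa using hlen
    rw [List.take_of_length_le (by omega)]
  | cons row tl ih =>
    intro i ns h hlen
    have hi : ns[i]? = some row := by simpa using h 0 (by simp)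
    obtain ⟨hilt, hri⟩ := List.getElem?_eq_some_iff.mp hi
    rw [PySem.List.enumerate_cons, List.foldl_cons]
    have hstep : (PySem.List.enumerate row (0 : Int)).foldl (advanceStepA state (i : Int)) ns
        = ns.set i (rowSpec state i 0 row) := by
      have h0 : (0 : Int) = ((0 : Nat) : Int) := rfl
      rw [h0, inner_eq state i row 0 ns row
        (by rw [List.getD_eq_getElem _ _ hilt, hri])
        (by intro k hk; simp [List.getElem?_eq_getElem hk])
        (by omega)]
      simp
    rw [hstep]
    have hcast : (i : Int) + 1 = ((i + 1 : Nat) : Int) := by push_cast; ring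
    rw [hcast]
    rw [ih (i + 1) (ns.set i (rowSpec state i 0 row))
      (by
        intro k hk
        rw [List.getElem?_set_ne (by omega)]
        have := h (k + 1) (by simpa using hk)
        simpa [Nat.add_assoc, Nat.add_comm 1 k] using this)
      (by simp only [List.length_set, List.length_cons] at hlen ⊢; omega)]
    rw [take_succ_set ns i _ hilt]
    simp [gridSpec]

lemma A_char (state : List (List String)) :
    advance_time state = gridSpec state 0 state := by
  have h := outer_eq state state 0 state
    (by intro k hk; simp [List.getElem?_eq_getElem hk])
    (by omega)
  unfold advance_time
  simpa using h

def bugN (state : List (List String)) (y x : Nat) : Int :=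
  if (state.getD y []).getD x "" == "#" then 1 else 0

lemma adj_eq (state : List (List String)) (x y : Nat)
    (hy : y < state.length) (hx : x < (state.headD []).length)
    (hrow : ∀ k, k < state.length → (state.getD k []).length = (state.headD []).length) :
    adjacent_bugs state ↑x ↑y =
      (if x + 1 < (state.headD []).length then bugN state y (x + 1) else 0)
      + (if x = 0 then 0 else bugN state y (x - 1))
      + (if y + 1 < state.length then bugN state (y + 1) x else 0)
      + (if y = 0 then 0 else bugN state (y - 1) x) := by
  have h0 : (0 : Nat) < state.length := by omega
  unfold adjacent_bugs
  simp only [PySem.List.pyGetD_zero, PySem.List.len_eq, PySem.List.pyGetD_natCast, hrow 0 h0]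
  have hL : (if (x : Int) - 1 ≥ 0 then
        (if PySem.List.pyGetD (state.getD y []) ((x : Int) - 1) "" == "#" then (1 : Int) else 0)
      else 0) = (if x = 0 then 0 else bugN state y (x - 1)) := by
    rcases Nat.eq_zero_or_pos x with h | h
    · subst h
      rw [if_neg (show ¬(((0 : Nat) : Int) - 1 ≥ 0) by omega), if_pos rfl]
    · rw [if_pos (show (x : Int) - 1 ≥ 0 by omega), if_neg (show ¬(x = 0) by omega),
        show (x : Int) - 1 = ((x - 1 : Nat) : Int) by omega, PySem.List.pyGetD_natCast]
      rfl
  have hR : (if (x : Int) + 1 < (((state.headD []).length : Nat) : Int) then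
        (if PySem.List.pyGetD (state.getD y []) ((x : Int) + 1) "" == "#" then (1 : Int) else 0)
      else 0) = (if x + 1 < (state.headD []).length then bugN state y (x + 1) else 0) := by
    by_cases h : x + 1 < (state.headD []).length
    · rw [if_pos (show (x : Int) + 1 < (((state.headD []).length : Nat) : Int) by omega), if_pos h,
        show (x : Int) + 1 = ((x + 1 : Nat) : Int) by omega, PySem.List.pyGetD_natCast]
      rfl
    · rw [if_neg (show ¬((x : Int) + 1 < (((state.headD []).length : Nat) : Int)) by omega), if_neg h]
  have hU : (if (y : Int) - 1 ≥ 0 then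
        (if (PySem.List.pyGetD state ((y : Int) - 1) []).getD x "" == "#" then (1 : Int) else 0)
      else 0) = (if y = 0 then 0 else bugN state (y - 1) x) := by
    rcases Nat.eq_zero_or_pos y with h | h
    · subst h
      rw [if_neg (show ¬(((0 : Nat) : Int) - 1 ≥ 0) by omega), if_pos rfl]
    · rw [if_pos (show (y : Int) - 1 ≥ 0 by omega), if_neg (show ¬(y = 0) by omega),
        show (y : Int) - 1 = ((y - 1 : Nat) : Int) by omega, PySem.List.pyGetD_natCast]
      rfl
  have hD : (if (y : Int) + 1 < ((state.length : Nat) : Int) then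
        (if (PySem.List.pyGetD state ((y : Int) + 1) []).getD x "" == "#" then (1 : Int) else 0)
      else 0) = (if y + 1 < state.length then bugN state (y + 1) x else 0) := by
    by_cases h : y + 1 < state.length
    · rw [if_pos (show (y : Int) + 1 < ((state.length : Nat) : Int) by omega), if_pos h,
        show (y : Int) + 1 = ((y + 1 : Nat) : Int) by omega, PySem.List.pyGetD_natCast]
      rfl
    · rw [if_neg (show ¬((y : Int) + 1 < ((state.length : Nat) : Int)) by omega), if_neg h]
  rw [← hL, ← hR, ← hU, ← hD]
  split_ifs <;> ring

lemma rowSpec_length (state : List (List String)) (y : Nat) :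
    ∀ (j : Nat) (row : List String), (rowSpec state y j row).length = row.length := by
  intro j row
  induction row generalizing j with
  | nil => simp [rowSpec]
  | cons c tl ih => simp [rowSpec, ih]

lemma gridSpec_length (state : List (List String)) :
    ∀ (i : Nat) (g : List (List String)), (gridSpec state i g).length = g.length := by
  intro i g
  induction g generalizing i with
  | nil => simp [gridSpec]
  | cons row tl ih => simp [gridSpec, ih]

lemma rowSpec_getElem? (state : List (List String)) (y : Nat) :
    ∀ (row : List String) (j k : Nat),
    (rowSpec state y j row)[k]? = (row[k]?).map (fun c => cellSpec state y (j + k) c) := by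
  intro row
  induction row with
  | nil => intro j k; simp [rowSpec]
  | cons c tl ih =>
    intro j k
    cases k with
    | zero => simp [rowSpec]
    | succ k' =>
      have e : j + (k' + 1) = (j + 1) + k' := by omega
      simp [rowSpec, ih (j + 1) k', e]

lemma gridSpec_getElem? (state : List (List String)) :
    ∀ (g : List (List String)) (i k : Nat),
    (gridSpec state i g)[k]? = (g[k]?).map (fun row => rowSpec state (i + k) 0 row) := by
  intro g
  induction g with
  | nil => intro i k; simp [gridSpec]
  | cons row tl ih =>
    intro i k
    cases k with
    | zero => simp [gridSpec]
    | succ k' =>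
      have e : i + (k' + 1) = (i + 1) + k' := by omega
      simp [gridSpec, ih (i + 1) k', e]

lemma B_char (state : List (List String)) (hpre : Pre_advance_time state) :
    advance_time_alt state = gridSpec state 0 state := by
  by_cases hne : state = []
  · subst hne; rfl
  have h0 : 0 < state.length := List.length_pos_of_ne_nil hne
  have hrow : ∀ k, k < state.length → (state.getD k []).length = (state.headD []).length := by
    intro k hk
    rw [List.getD_eq_getElem _ _ hk]
    exact hpre _ (List.getElem_mem hk)
  simp only [advance_time_alt, PySem.List.slice_from_one, PySem.List.slice_to_neg_one,
    List.zip_eq_zipWith, List.map_eq_nil_iff, if_neg hne]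
  set M := state.map (fun row => row.map (fun c => if c == "#" then (1 : Int) else 0)) with hM
  set Z := List.replicate (state.headD []).length (0 : Int) with hZ
  have hMlen : M.length = state.length := by rw [hM]; simp
  have hMgetD : ∀ k, M.getD k [] = (state.getD k []).map (fun c => if c == "#" then (1 : Int) else 0) := by
    intro k
    rw [hM, List.getD_eq_getElem?_getD, List.getD_eq_getElem?_getD, List.getElem?_map]
    cases state[k]? <;> simp
  apply List.ext_getElem?
  intro y
  by_cases hy : y < state.length
  case neg =>
    refine (List.getElem?_eq_none ?_).trans (List.getElem?_eq_none ?_).symm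
    · simp only [List.length_map, List.length_zipWith]
      omega
    · rw [gridSpec_length]
      omega
  case pos =>
  rw [gridSpec_getElem?, List.getElem?_eq_getElem hy]
  simp only [List.getElem?_map, List.getElem?_zipWith]
  have hfb : (M.tail ++ [Z])[y]? = some (if y + 1 < state.length then
      (state.getD (y + 1) []).map (fun c => if c == "#" then (1 : Int) else 0) else Z) := by
    rw [List.getElem?_append]
    by_cases hyl : y + 1 < state.length
    · rw [if_pos (by simp only [List.length_tail, hMlen]; omega), if_pos hyl, List.getElem?_tail,
        List.getElem?_eq_getElem (by omega : y + 1 < M.length),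
        ← List.getD_eq_getElem M [] (by omega : y + 1 < M.length), hMgetD]
    · rw [if_neg (by simp only [List.length_tail, hMlen]; omega), if_neg hyl,
        show y - M.tail.length = 0 by simp only [List.length_tail, hMlen]; omega]
      rfl
  have hfa : (Z :: M.dropLast)[y]? = some (if y = 0 then Z else
      (state.getD (y - 1) []).map (fun c => if c == "#" then (1 : Int) else 0)) := by
    cases y with
    | zero => simp
    | succ y' =>
      simp only [List.getElem?_cons_succ]
      rw [List.getElem?_dropLast, if_pos (by rw [hMlen]; omega),
        List.getElem?_eq_getElem (by rw [hMlen]; omega : y' < M.length),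
        ← List.getD_eq_getElem M [] (by rw [hMlen]; omega : y' < M.length), hMgetD,
        if_neg (by omega), show y' + 1 - 1 = y' by omega]
  rw [hfb, hfa]
  simp only [hM, List.getElem?_map, List.getElem?_eq_getElem hy, Option.map_some, Nat.zero_add]
  refine congrArg some ?_
  have hrlen : (state[y]'hy).length = (state.headD []).length := hpre _ (List.getElem_mem hy)
  apply List.ext_getElem?
  intro x
  by_cases hx : x < (state.headD []).length
  case neg =>
    refine (List.getElem?_eq_none ?_).trans (List.getElem?_eq_none ?_).symm
    · simp only [List.length_map, List.length_zipWith]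
      omega
    · rw [rowSpec_length]
      omega
  case pos =>
  have hgdy : state.getD y [] = state[y]'hy := List.getD_eq_getElem _ _ hy
  rw [rowSpec_getElem?]
  have hc1 : (((state[y]'hy).map (fun c => if c == "#" then (1 : Int) else 0)).tail ++ [(0 : Int)])[x]? =
      some (if x + 1 < (state.headD []).length then bugN state y (x + 1) else 0) := by
    rw [List.getElem?_append]
    by_cases hx1 : x + 1 < (state.headD []).length
    · rw [if_pos (by simp only [List.length_tail, List.length_map]; omega), if_pos hx1,
        List.getElem?_tail, List.getElem?_map,
        List.getElem?_eq_getElem (show x + 1 < (state[y]'hy).length by omega)]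
      simp only [Option.map_some, bugN, hgdy,
        List.getD_eq_getElem _ _ (show x + 1 < (state[y]'hy).length by omega)]
    · rw [if_neg (by simp only [List.length_tail, List.length_map]; omega), if_neg hx1,
        show x - (((state[y]'hy).map (fun c => if c == "#" then (1 : Int) else 0)).tail).length = 0
          by simp only [List.length_tail, List.length_map]; omega]
      rfl
  have hc2 : ((0 : Int) :: ((state[y]'hy).map (fun c => if c == "#" then (1 : Int) else 0)).dropLast)[x]? =
      some (if x = 0 then 0 else bugN state y (x - 1)) := by
    cases x with
    | zero => rfl
    | succ x' =>
      simp only [List.getElem?_cons_succ]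
      rw [List.getElem?_dropLast, if_pos (by simp only [List.length_map]; omega),
        List.getElem?_map, List.getElem?_eq_getElem (show x' < (state[y]'hy).length by omega),
        if_neg (by omega)]
      simp only [Option.map_some, bugN, hgdy, show x' + 1 - 1 = x' by omega,
        List.getD_eq_getElem _ _ (show x' < (state[y]'hy).length by omega)]
  have hc3 : (if y + 1 < state.length then
        (state.getD (y + 1) []).map (fun c => if c == "#" then (1 : Int) else 0) else Z)[x]? =
      some (if y + 1 < state.length then bugN state (y + 1) x else 0) := by
    by_cases hyl : y + 1 < state.length
    · rw [if_pos hyl, if_pos hyl, List.getElem?_map,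
        List.getElem?_eq_getElem (show x < (state.getD (y + 1) []).length by rw [hrow _ hyl]; omega)]
      simp only [Option.map_some, bugN,
        List.getD_eq_getElem _ _ (show x < (state.getD (y + 1) []).length by rw [hrow _ hyl]; omega)]
    · rw [if_neg hyl, if_neg hyl, hZ, List.getElem?_replicate, if_pos hx]
  have hc4 : (if y = 0 then Z else
        (state.getD (y - 1) []).map (fun c => if c == "#" then (1 : Int) else 0))[x]? =
      some (if y = 0 then 0 else bugN state (y - 1) x) := by
    by_cases hy0 : y = 0
    · rw [if_pos hy0, if_pos hy0, hZ, List.getElem?_replicate, if_pos hx]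
    · rw [if_neg hy0, if_neg hy0, List.getElem?_map,
        List.getElem?_eq_getElem (show x < (state.getD (y - 1) []).length by rw [hrow _ (by omega)]; omega)]
      simp only [Option.map_some, bugN,
        List.getD_eq_getElem _ _ (show x < (state.getD (y - 1) []).length by rw [hrow _ (by omega)]; omega)]
  simp only [List.getElem?_map, List.getElem?_zipWith,
    List.getElem?_eq_getElem (show x < (state[y]'hy).length by omega), Option.map_some, Nat.zero_add]
  rw [hc1, hc2, hc3, hc4]
  simp only [Option.map_some]
  refine congrArg some ?_
  unfold cellSpec
  rw [adj_eq state x y hy hx hrow]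

-- ===== VERDICT (by name: the statement is the Claim_ definition above) =====
theorem advance_time_spec : Claim_equal_advance_time := by
  intro state _ hpre
  unfold Spec_advance_time
  rw [A_char, B_char state hpre]
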